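-- pv_equiv track=rewrite | github.com/smallworld-re/smallworld | smallworld/state/memory/elf/rela/arm.py | _arm_group
-- ===== SOURCE A (Python) =====
-- def _arm_group(residual: int) -> int:
--     if residual == 0:
--         return 0
--     msb = residual.bit_length() - 1
--     for k in range(16):
--         if (1 << msb) & (0xFF << (2 * k)):
--             return residual & (0xFF << (2 * k))
--     return residual & 0xFF
-- ===== SOURCE B (Python) =====
-- def _arm_group(residual: int) -> int:
--     if residual == 0:
--         return 0
--     msb = residual.bit_length() - 1
--     k = max(0, (msb - 6) // 2)
--     if k > 15:
--         return residual & 0xFF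
--     return residual & (0xFF << (2 * k))
-- ===== Notes on version B (the rewrite author's own statement) =====
-- stated objective: simpler
-- what changed: Replaces the fixed-length window scan loop with a direct arithmetic computation of the window index k = max(0, (msb - 6) // 2), keeping the loop's fall-through mask as a single branch.
import Mathlib
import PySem

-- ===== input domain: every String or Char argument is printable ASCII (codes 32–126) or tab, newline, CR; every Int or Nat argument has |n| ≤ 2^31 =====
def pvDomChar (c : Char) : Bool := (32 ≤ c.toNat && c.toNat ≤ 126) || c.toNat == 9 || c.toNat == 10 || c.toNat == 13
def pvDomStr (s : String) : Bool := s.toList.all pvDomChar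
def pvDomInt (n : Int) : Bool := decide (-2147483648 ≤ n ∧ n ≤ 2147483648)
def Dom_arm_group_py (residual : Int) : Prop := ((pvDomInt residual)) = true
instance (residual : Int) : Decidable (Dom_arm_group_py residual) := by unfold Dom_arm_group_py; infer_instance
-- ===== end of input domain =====

-- B replaces A's 16-iteration window scan by a direct arithmetic computation of the window index (simpler).


-- ===== PORT A =====
-- the `for k in range(16)` loop with its early return; falls through to `residual & 0xFF`
def armLoopA (residual : Int) (msb : Nat) : List Int → Int
  | [] => PySem.Int.band residual 0xFF
  | k :: ks =>
      if PySem.Int.band (1 <<< msb) (0xFF <<< (2 * k).toNat) ≠ 0 then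
        PySem.Int.band residual (0xFF <<< (2 * k).toNat)
      else armLoopA residual msb ks

def arm_group_py (residual : Int) : Int :=
  if residual = 0 then 0
  else
    let msb : Nat := PySem.Int.bitLength residual - 1
    armLoopA residual msb (PySem.List.pyRange 0 16 1)

-- ===== PORT B =====
def arm_group_py_alt (residual : Int) : Int :=
  if residual = 0 then 0
  else
    let msb : Int := PySem.Int.bitLength residual - 1
    let k : Int := max 0 (PySem.Int.floordiv (msb - 6) 2)
    if k > 15 then PySem.Int.band residual 0xFF
    else PySem.Int.band residual (0xFF <<< (2 * k).toNat)

-- ===== PRECONDITION & SPEC =====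
def Spec_arm_group_py (residual : Int) (out : Int) : Prop := out = arm_group_py_alt residual
instance (residual : Int) (out : Int) : Decidable (Spec_arm_group_py residual out) := by unfold Spec_arm_group_py; infer_instance

-- ===== CLAIM (what is proved, stated in full; the proofs are below) =====
def Claim_equal_arm_group_py : Prop := ∀ (residual : Int), Dom_arm_group_py residual → Spec_arm_group_py residual (arm_group_py residual)

-- ===== LEMMAS AND PROOFS =====
-- mask chosen by A's loop, as a function of msb alone
def maskOfA (msb : Nat) : List Int → Int
  | [] => 0xFF
  | k :: ks =>
      if PySem.Int.band (1 <<< msb) (0xFF <<< (2 * k).toNat) ≠ 0 then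
        0xFF <<< (2 * k).toNat
      else maskOfA msb ks

theorem armLoopA_eq_band_mask (residual : Int) (msb : Nat) (l : List Int) :
    armLoopA residual msb l = PySem.Int.band residual (maskOfA msb l) := by
  induction l with
  | nil => rfl
  | cons k ks ih => simp only [armLoopA, maskOfA]; split_ifs <;> simp [ih]

-- for msb ≤ 31 the loop's mask equals B's arithmetic mask (and B's k ≤ 15)
theorem mask_eq (msb : Nat) (h : msb ≤ 31) :
    maskOfA msb (PySem.List.pyRange 0 16 1)
      = 0xFF <<< (2 * (max 0 (PySem.Int.floordiv ((msb : Int) - 6) 2))).toNat := by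
  interval_cases msb <;> decide

theorem k_le (msb : Nat) (h : msb ≤ 31) :
    ¬ (max 0 (PySem.Int.floordiv ((msb : Int) - 6) 2) > 15) := by
  interval_cases msb <;> decide

theorem bitLength_le (residual : Int) (h : Dom_arm_group_py residual) :
    PySem.Int.bitLength residual - 1 ≤ 31 := by
  by_contra hc
  have h2 : 2 ^ (PySem.Int.bitLength residual - 1) ≤ residual.natAbs :=
    PySem.Int.two_pow_bitLength_le residual (by
      intro h0; subst h0; simp [PySem.Int.bitLength_zero] at hc)
  have h3 : (2 : Nat) ^ 32 ≤ 2 ^ (PySem.Int.bitLength residual - 1) :=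
    Nat.pow_le_pow_right (by norm_num) (by omega)
  have h4 : residual.natAbs ≤ 2 ^ 31 := by
    unfold Dom_arm_group_py pvDomInt at h
    simp only [decide_eq_true_eq] at h
    omega
  omega

-- ===== VERDICT (by name: the statement is the Claim_ definition above) =====
theorem arm_group_py_spec : Claim_equal_arm_group_py := by
  intro residual hdom
  unfold Spec_arm_group_py arm_group_py arm_group_py_alt
  by_cases h0 : residual = 0
  · simp [h0]
  · have hmsb : PySem.Int.bitLength residual - 1 ≤ 31 := bitLength_le residual hdom
    have hcast : ((PySem.Int.bitLength residual : Int) - 1)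
        = ((PySem.Int.bitLength residual - 1 : Nat) : Int) := by
      have : 1 ≤ PySem.Int.bitLength residual := by
        by_contra hb
        have : PySem.Int.bitLength residual = 0 := by omega
        have hlt := PySem.Int.lt_two_pow_bitLength residual
        rw [this] at hlt
        simp at hlt
        exact h0 (by omega)
      push_cast [this]; ring
    simp only [if_neg h0, hcast]
    rw [armLoopA_eq_band_mask, mask_eq _ hmsb, if_neg (k_le _ hmsb)]
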